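-- pv_equiv track=rewrite | github.com/jerrt2003/leetcode-in-python | live-interview-feedback/Google/字串處理/singleLevelBracket.py | getAllCombination
-- ===== SOURCE A (Python) =====
-- def getAllCombination(s):
--
--     def findCombo(idx):
--         cache = ''
--         while idx < len(s):
--             if s[idx] == '}':
--                 return idx, cache.split(',')
--             else:
--                 cache += s[idx]
--             idx += 1
--
--     res, i = [''], 0
--     while i < len(s):
--         if s[i] == '{':
--             i, combo = findCombo(i+1)
--             res = [a+b for a in res for b in combo]
--         else:
--             res = [a+s[i] for a in res]
--         i += 1
--
--     return res
-- ===== SOURCE B (Python) =====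
-- def getAllCombination(s):
--     # Two-phase: parse s once into a list of alternative groups, then take their product.
--     groups = []
--     buf = ''
--     i, n = 0, len(s)
--     while i < n:
--         c = s[i]
--         if c != '{':
--             buf += c
--             i += 1
--         else:
--             if buf:
--                 groups.append([buf])
--                 buf = ''
--             j = s.index('}', i + 1)
--             groups.append(s[i + 1:j].split(','))
--             i = j + 1
--     if buf:
--         groups.append([buf])
--     res = ['']
--     for g in groups:
--         res = [a + b for a in res for b in g]
--     return res
-- ===== Notes on version B (the rewrite author's own statement) =====
-- stated objective: idiomatic
-- what changed: A interleaves scanning with multiplying the running result list at every character; B is a two-phase decomposition that first parses the string once into a list of alternative groups (literal runs buffered and flushed as single-alternative groups) and then combines the groups by a recursive product.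
import Mathlib
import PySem

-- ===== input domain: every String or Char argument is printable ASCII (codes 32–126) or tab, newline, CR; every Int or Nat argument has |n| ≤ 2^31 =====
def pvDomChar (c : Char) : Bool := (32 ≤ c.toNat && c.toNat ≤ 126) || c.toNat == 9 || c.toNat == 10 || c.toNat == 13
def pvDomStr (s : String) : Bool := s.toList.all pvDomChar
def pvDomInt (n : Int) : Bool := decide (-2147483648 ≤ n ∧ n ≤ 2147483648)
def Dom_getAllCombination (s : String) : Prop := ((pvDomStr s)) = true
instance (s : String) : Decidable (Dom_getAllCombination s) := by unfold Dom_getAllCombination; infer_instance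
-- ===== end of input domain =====

-- B restructures A's interleaved scan-and-multiply into parse-into-groups then combine (an idiomatic two-phase decomposition); same cost.

-- ===== PORT A =====
-- Strings are handled as their char lists (PySem.Chars level); String.ofList at the boundary.
-- The while-loops are ported with a structural fuel argument that only makes them total: with the
-- fuel supplied at the call sites it is never exhausted (each step consumes 1 fuel and advances
-- the index by at least 1, bounded by the string length).
-- findCombo: scan from idx accumulating cache until the first '}'; none = Python's loop falls off
-- the string and returns None (the caller then raises TypeError; excluded by Pre_).
def findComboA (l : List Char) : Nat → Nat → List Char → Option (Nat × List (List Char))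
  | 0, _, _ => none
  | fuel + 1, idx, cache =>
    if h : idx < l.length then
      if l[idx] = '}' then some (idx, PySem.Chars.splitOn cache [','])
      else findComboA l fuel (idx + 1) (cache ++ [l[idx]])
    else none

def loopA (l : List Char) : Nat → List (List Char) → Nat → List (List Char)
  | 0, res, _ => res
  | fuel + 1, res, i =>
    if h : i < l.length then
      if l[i] = '{' then
        match findComboA l l.length (i + 1) [] with
        | some (j, combo) => loopA l fuel (res.flatMap fun a => combo.map fun b => a ++ b) (j + 1)
        | none => res  -- Python: TypeError (unpacking None); excluded by Pre_
      else loopA l fuel (res.map fun a => a ++ [l[i]]) (i + 1)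
    else res

def getAllCombination (s : String) : List String :=
  (loopA s.toList s.toList.length [[]] 0).map String.ofList

-- ===== PORT B =====
-- parse: one scan producing the list of alternative groups; a buffered literal is flushed as a
-- single-alternative group.  s.index('}', i+1) is ported as List.idxOf? on the dropped list
-- (exact: first occurrence at or after i+1; none = Python ValueError; excluded by Pre_).
-- The same structural fuel device as above makes the scan total.
def parseB (l : List Char) : Nat → Nat → List Char → List (List (List Char))
  | 0, _, buf => if buf = [] then [] else [[buf]]
  | fuel + 1, i, buf =>
    if h : i < l.length then
      if l[i] ≠ '{' then parseB l fuel (i + 1) (buf ++ [l[i]])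
      else
        match List.idxOf? '}' (l.drop (i + 1)) with
        | some r =>
            (if buf = [] then [] else [[buf]])
              ++ [PySem.Chars.splitOn ((l.drop (i + 1)).take r) [',']]
              ++ parseB l fuel (i + 1 + r + 1) []
        | none => if buf = [] then [] else [[buf]]  -- Python: ValueError from s.index; excluded by Pre_
    else if buf = [] then [] else [[buf]]

def combineB (groups : List (List (List Char))) : List (List Char) :=
  groups.foldl (fun res g => res.flatMap fun a => g.map fun b => a ++ b) [[]]

def getAllCombination_alt (s : String) : List String :=
  (combineB (parseB s.toList s.toList.length 0 [])).map String.ofList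

-- ===== PRECONDITION & SPEC =====
-- Pre_ excludes exactly the strings with an unclosed '{' (a '{' with no '}' after it): there A
-- raises TypeError (findCombo returns None) and B raises ValueError (s.index fails).
def Pre_getAllCombination (s : String) : Prop :=
  ∀ k, k < s.toList.length → s.toList.getD k ' ' = '{' →
    ∃ j, j < s.toList.length ∧ k < j ∧ s.toList.getD j ' ' = '}'
instance (s : String) : Decidable (Pre_getAllCombination s) := by
  unfold Pre_getAllCombination; infer_instance

def pvWitness_getAllCombination : String := "{a,b}c{d,e}"

def Spec_getAllCombination (s : String) (out : List String) : Prop := out = getAllCombination_alt s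
instance (s : String) (out : List String) : Decidable (Spec_getAllCombination s out) := by
  unfold Spec_getAllCombination; infer_instance

-- ===== CLAIM (what is proved, stated in full; the proofs are below) =====
def Claim_equal_getAllCombination : Prop :=
  ∀ (s : String), Dom_getAllCombination s → Pre_getAllCombination s →
    Spec_getAllCombination s (getAllCombination s)

-- ===== LEMMAS AND PROOFS =====

-- proof-side recursive form of B's product loop (combineB is its foldl)
def combineR : List (List (List Char)) → List (List Char)
  | [] => [[]]
  | g :: gs => g.flatMap fun b => (combineR gs).map fun rest => b ++ rest

theorem combineB_foldl (gs : List (List (List Char))) : ∀ acc : List (List Char),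
    gs.foldl (fun res g => res.flatMap fun a => g.map fun b => a ++ b) acc
      = acc.flatMap (fun a => (combineR gs).map (fun t => a ++ t)) := by
  induction gs with
  | nil => intro acc; simp [combineR]
  | cons g gs ih =>
    intro acc
    rw [List.foldl_cons, ih]
    simp [combineR, List.flatMap_assoc, List.flatMap_map, List.map_flatMap,
          List.map_map, Function.comp_def, List.append_assoc]

theorem combineB_eq (gs : List (List (List Char))) : combineB gs = combineR gs := by
  rw [combineB, combineB_foldl]
  simp


-- one-step unfolding equations for the two ports
theorem loopA_zero (l : List Char) (res : List (List Char)) (i : Nat) :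
    loopA l 0 res i = res := rfl

theorem loopA_end (l : List Char) (fuel : Nat) (res : List (List Char)) (i : Nat)
    (h : ¬ i < l.length) : loopA l (fuel + 1) res i = res := by
  rw [loopA, dif_neg h]

theorem loopA_elt (l : List Char) (fuel : Nat) (res : List (List Char)) (i : Nat)
    (h : i < l.length) (hc : ¬ l[i] = '{') :
    loopA l (fuel + 1) res i = loopA l fuel (res.map fun a => a ++ [l[i]]) (i + 1) := by
  rw [loopA, dif_pos h, if_neg hc]

theorem loopA_brace (l : List Char) (fuel : Nat) (res : List (List Char)) (i j : Nat)
    (combo : List (List Char)) (h : i < l.length) (hc : l[i] = '{')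
    (hf : findComboA l l.length (i + 1) [] = some (j, combo)) :
    loopA l (fuel + 1) res i
      = loopA l fuel (res.flatMap fun a => combo.map fun b => a ++ b) (j + 1) := by
  rw [loopA, dif_pos h, if_pos hc, hf]

theorem parseB_zero (l : List Char) (i : Nat) (buf : List Char) :
    parseB l 0 i buf = if buf = [] then [] else [[buf]] := rfl

theorem parseB_end (l : List Char) (fuel : Nat) (i : Nat) (buf : List Char)
    (h : ¬ i < l.length) : parseB l (fuel + 1) i buf = if buf = [] then [] else [[buf]] := by
  rw [parseB, dif_neg h]

theorem parseB_elt (l : List Char) (fuel : Nat) (i : Nat) (buf : List Char)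
    (h : i < l.length) (hc : ¬ l[i] = '{') :
    parseB l (fuel + 1) i buf = parseB l fuel (i + 1) (buf ++ [l[i]]) := by
  rw [parseB, dif_pos h, if_pos hc]

theorem parseB_brace (l : List Char) (fuel : Nat) (i : Nat) (buf : List Char) (r : Nat)
    (h : i < l.length) (hc : l[i] = '{')
    (hr : List.idxOf? '}' (l.drop (i + 1)) = some r) :
    parseB l (fuel + 1) i buf
      = (if buf = [] then [] else [[buf]])
          ++ [PySem.Chars.splitOn ((l.drop (i + 1)).take r) [',']]
          ++ parseB l fuel (i + 1 + r + 1) [] := by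
  rw [parseB, dif_pos h, if_neg (not_not_intro hc), hr]

theorem parseB_brace_none (l : List Char) (fuel : Nat) (i : Nat) (buf : List Char)
    (h : i < l.length) (hc : l[i] = '{')
    (hr : List.idxOf? '}' (l.drop (i + 1)) = none) :
    parseB l (fuel + 1) i buf = if buf = [] then [] else [[buf]] := by
  rw [parseB, dif_pos h, if_neg (not_not_intro hc), hr]

-- findComboA stops at the FIRST '}' at or after idx, returning it with the split accumulated
-- segment (any fuel beyond the distance to that '}' suffices).
theorem findComboA_spec (l : List Char) : ∀ r fuel idx cache, r < fuel →
    (∀ m, idx ≤ m → m < idx + r → l.getD m ' ' ≠ '}') →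
    idx + r < l.length → l.getD (idx + r) ' ' = '}' →
    findComboA l fuel idx cache
      = some (idx + r, PySem.Chars.splitOn (cache ++ (l.drop idx).take r) [',']) := by
  intro r
  induction r with
  | zero =>
    intro fuel idx cache hfuel _ hlt hget
    obtain ⟨f, rfl⟩ : ∃ f, fuel = f + 1 := ⟨fuel - 1, by omega⟩
    have hl : idx < l.length := by omega
    have hg : l[idx] = '}' := by rw [← List.getD_eq_getElem l ' ' hl]; simpa using hget
    rw [findComboA, dif_pos hl, if_pos hg]
    simp
  | succ r ih =>
    intro fuel idx cache hfuel hno hlt hget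
    obtain ⟨f, rfl⟩ : ∃ f, fuel = f + 1 := ⟨fuel - 1, by omega⟩
    have hl : idx < l.length := by omega
    have hne : l[idx] ≠ '}' := by
      rw [← List.getD_eq_getElem l ' ' hl]
      exact hno idx le_rfl (by omega)
    rw [findComboA, dif_pos hl, if_neg hne]
    have heq := ih f (idx + 1) (cache ++ [l[idx]]) (by omega)
      (fun m hm1 hm2 => hno m (by omega) (by omega)) (by omega)
      (by have h' : idx + 1 + r = idx + (r + 1) := by omega
          rw [h']; exact hget)
    rw [heq]
    have hseg : cache ++ [l[idx]] ++ (l.drop (idx + 1)).take r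
        = cache ++ (l.drop idx).take (r + 1) := by
      rw [List.drop_eq_getElem_cons hl, List.take_succ_cons, List.append_assoc]
      rfl
    rw [hseg]
    have h2 : idx + 1 + r = idx + (r + 1) := by omega
    rw [h2]

-- combineR over a parse with a pending buffer = the buffer prepended to every combination.
theorem parseB_buf (l : List Char) : ∀ fuel i buf, l.length - i ≤ fuel →
    combineR (parseB l fuel i buf) = (combineR (parseB l fuel i [])).map (fun t => buf ++ t) := by
  intro fuel
  induction fuel with
  | zero =>
    intro i buf _
    rw [parseB_zero, parseB_zero]
    by_cases hb : buf = [] <;> simp [hb, combineR]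
  | succ fuel ih =>
    intro i buf hn
    by_cases h : i < l.length
    · by_cases hc : l[i] = '{'
      · cases hr : List.idxOf? '}' (l.drop (i + 1)) with
        | some r =>
          rw [parseB_brace l fuel i buf r h hc hr, parseB_brace l fuel i [] r h hc hr]
          by_cases hb : buf = [] <;> simp [hb, combineR]
        | none =>
          rw [parseB_brace_none l fuel i buf h hc hr, parseB_brace_none l fuel i [] h hc hr]
          by_cases hb : buf = [] <;> simp [hb, combineR]
      · rw [parseB_elt l fuel i buf h hc, parseB_elt l fuel i [] h hc, List.nil_append,
            ih (i + 1) (buf ++ [l[i]]) (by omega), ih (i + 1) [l[i]] (by omega)]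
        simp [List.map_map, Function.comp_def, List.append_assoc]
    · rw [parseB_end l fuel i buf h, parseB_end l fuel i [] h]
      by_cases hb : buf = [] <;> simp [hb, combineR]

-- the main loop invariant: A's loop from i = every accumulated prefix in res crossed with B's
-- combinations of the remaining string.
theorem loopA_eq (l : List Char) : ∀ fuel i res, l.length - i ≤ fuel →
    (∀ k, i ≤ k → k < l.length → l.getD k ' ' = '{' →
      ∃ j, j < l.length ∧ k < j ∧ l.getD j ' ' = '}') →
    loopA l fuel res i
      = res.flatMap (fun a => (combineR (parseB l fuel i [])).map (fun t => a ++ t)) := by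
  intro fuel
  induction fuel with
  | zero =>
    intro i res hn _
    rw [loopA_zero, parseB_zero]
    simp [combineR]
  | succ fuel ih =>
    intro i res hn hgood
    by_cases h : i < l.length
    · by_cases hc : l[i] = '{'
      · -- a brace group: Pre_ gives a closing '}' after i; idxOf? finds the first one
        obtain ⟨j0, hj0len, hj0gt, hj0get⟩ :=
          hgood i le_rfl h (by rw [List.getD_eq_getElem l ' ' h]; exact hc)
        have hmem : '}' ∈ l.drop (i + 1) := by
          have hm : j0 - (i + 1) < (l.drop (i + 1)).length := by
            simp only [List.length_drop]; omega
          have hg : (l.drop (i + 1))[j0 - (i + 1)] = '}' := by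
            rw [List.getElem_drop]
            rw [← List.getD_eq_getElem l ' ' (by omega : i + 1 + (j0 - (i + 1)) < l.length)]
            have he : i + 1 + (j0 - (i + 1)) = j0 := by omega
            rw [he]; exact hj0get
          rw [← hg]; exact List.getElem_mem hm
        cases hr : List.idxOf? '}' (l.drop (i + 1)) with
        | none => exact absurd (List.idxOf?_eq_none_iff.mp hr) (by simpa using hmem)
        | some r =>
          obtain ⟨hrlen, hrget, hrfirst⟩ := List.idxOf?_eq_some_iff.mp hr
          have hrlen' : i + 1 + r < l.length := by
            simp only [List.length_drop] at hrlen; omega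
          have hfc : findComboA l l.length (i + 1) []
              = some (i + 1 + r, PySem.Chars.splitOn ([] ++ (l.drop (i + 1)).take r) [',']) := by
            refine findComboA_spec l r l.length (i + 1) [] (by omega) ?_ hrlen' ?_
            · intro m hm1 hm2 hmget
              have hmlt : m - (i + 1) < r := by omega
              refine hrfirst (m - (i + 1)) hmlt ?_
              rw [List.getElem_drop]
              rw [← List.getD_eq_getElem l ' ' (by omega : i + 1 + (m - (i + 1)) < l.length)]
              have he : i + 1 + (m - (i + 1)) = m := by omega
              rw [he]; exact hmget
            · rw [List.getD_eq_getElem l ' ' hrlen']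
              rw [← List.getElem_drop (h := by simpa using hrlen)]
              exact hrget
          rw [loopA_brace l fuel res i (i + 1 + r) _ h hc hfc]
          rw [ih (i + 1 + r + 1) _ (by omega)
            (fun k hk1 hk2 hk3 => hgood k (by omega) hk2 hk3)]
          rw [parseB_brace l fuel i [] r h hc hr]
          simp only [List.nil_append]
          simp [combineR, List.flatMap_assoc, List.flatMap_map, List.map_flatMap,
                List.map_map, Function.comp_def, List.append_assoc]
      · -- a literal character
        rw [loopA_elt l fuel res i h hc]
        rw [ih (i + 1) _ (by omega) (fun k hk1 hk2 hk3 => hgood k (by omega) hk2 hk3)]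
        rw [parseB_elt l fuel i [] h hc, List.nil_append,
            parseB_buf l fuel (i + 1) [l[i]] (by omega)]
        simp [List.flatMap_map, List.map_map, Function.comp_def, List.append_assoc]
    · rw [loopA_end l fuel res i h, parseB_end l fuel i [] h]
      simp [combineR]

-- ===== VERDICT (by name: the statement is the Claim_ definition above) =====
theorem getAllCombination_spec : Claim_equal_getAllCombination := by
  intro s _ hpre
  unfold Spec_getAllCombination getAllCombination getAllCombination_alt
  rw [combineB_eq, loopA_eq s.toList s.toList.length 0 [[]] (by omega) (fun k _ => hpre k)]
  simp
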